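-- pv_equiv track=rewrite | github.com/pypi-data/pypi-mirror-401 | packages/doc-extraction/doc_extraction-0.0.1.tar.gz/doc_extraction-0.0.1/src/extraction/analyzers/generic.py | extract_subjects
-- ===== SOURCE A (Python) =====
-- from typing import Dict, List, Any
--
-- def extract_subjects(text: str, chunks: List[Dict]) -> List[str]:
--     """
--     Extract subjects from top-level headings.
--
--     Looks at level_1 and level_2 hierarchy entries across all chunks
--     to identify main subject areas.
--
--     Args:
--         text: Complete text of the document
--         chunks: List of chunk dictionaries
--
--     Returns:
--         List of subject strings (up to 5 most common)
--     """
--     subjects = []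
--
--     for chunk in chunks:
--         hierarchy = chunk.get("hierarchy", {})
--
--         level_1 = hierarchy.get("level_1", "").strip()
--         if level_1 and level_1 not in subjects:
--             subjects.append(level_1)
--
--         level_2 = hierarchy.get("level_2", "").strip()
--         if level_2 and level_2 not in subjects:
--             subjects.append(level_2)
--
--     return subjects[:5]
-- ===== SOURCE B (Python) =====
-- def extract_subjects(text, chunks):
--     """Recursive rewrite: flatten the non-empty stripped headings into one
--     candidate stream, then recursively pick the first occurrences, building
--     the output by cons and stopping as soon as 5 subjects are found."""
--     def headings(chunk):
--         h = chunk.get("hierarchy", {})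
--         out = []
--         for key in ("level_1", "level_2"):
--             v = h.get(key, "").strip()
--             if v:
--                 out.append(v)
--         return out
--
--     def pick(cands, seen, need):
--         if need == 0 or not cands:
--             return []
--         head, rest = cands[0], cands[1:]
--         if head in seen:
--             return pick(rest, seen, need)
--         return [head] + pick(rest, seen | {head}, need - 1)
--
--     flat = [c for ch in chunks for c in headings(ch)]
--     return pick(flat, set(), 5)
-- ===== Notes on version B (the rewrite author's own statement) =====
-- stated objective: alternative
-- what changed: Replaces A's single loop that appends into the result list under a membership check and slices at the end with a flat candidate stream consumed by a recursive picker that carries a seen-set and a remaining-count, builds the output by cons, and terminates as soon as 5 subjects are found.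
import Mathlib
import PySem

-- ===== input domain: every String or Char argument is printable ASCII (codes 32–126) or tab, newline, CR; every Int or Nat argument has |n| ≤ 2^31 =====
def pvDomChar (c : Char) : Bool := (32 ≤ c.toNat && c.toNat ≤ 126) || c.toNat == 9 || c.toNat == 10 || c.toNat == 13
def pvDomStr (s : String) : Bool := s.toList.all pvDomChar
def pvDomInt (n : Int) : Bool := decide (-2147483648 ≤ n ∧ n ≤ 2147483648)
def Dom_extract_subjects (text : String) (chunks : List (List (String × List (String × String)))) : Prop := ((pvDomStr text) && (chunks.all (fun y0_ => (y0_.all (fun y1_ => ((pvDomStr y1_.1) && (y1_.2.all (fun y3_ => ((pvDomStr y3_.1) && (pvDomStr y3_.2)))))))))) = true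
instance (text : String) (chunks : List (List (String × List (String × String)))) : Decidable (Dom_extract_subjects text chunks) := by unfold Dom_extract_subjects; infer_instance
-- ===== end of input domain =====

-- B replaces A's membership-checked appends into the result list with a flat candidate
-- stream consumed by a recursive picker (seen-set + remaining count, output built by cons,
-- stops as soon as 5 subjects are found); objective: an alternative decomposition.

-- shared dict.get(k, dflt) on an association list (first match, per the type convention)
def pyAssocGetD {α : Type} (d : List (String × α)) (k : String) (dflt : α) : α :=
  ((d.find? (fun p => p.1 == k)).map Prod.snd).getD dflt

-- ===== PORT A =====
def extract_subjects_step (subjects : List String) (chunk : List (String × List (String × String))) : List String :=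
  let hierarchy := pyAssocGetD chunk "hierarchy" []
  let level_1 := PySem.Str.strip (pyAssocGetD hierarchy "level_1" "")
  let subjects := if level_1 ≠ "" ∧ level_1 ∉ subjects then subjects ++ [level_1] else subjects
  let level_2 := PySem.Str.strip (pyAssocGetD hierarchy "level_2" "")
  if level_2 ≠ "" ∧ level_2 ∉ subjects then subjects ++ [level_2] else subjects

def extract_subjects (text : String) (chunks : List (List (String × List (String × String)))) : List String :=
  (chunks.foldl extract_subjects_step []).take 5

-- ===== PORT B =====
-- headings(chunk): the non-empty stripped level_1/level_2 values, in order
def extract_subjects_alt_headings (chunk : List (String × List (String × String))) : List String :=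
  let h := pyAssocGetD chunk "hierarchy" []
  ["level_1", "level_2"].foldl (fun out key =>
    let v := PySem.Str.strip (pyAssocGetD h key "")
    if v ≠ "" then out ++ [v] else out) []

-- pick(cands, seen, need): recursive first-occurrence selection, stops when need = 0
def extract_subjects_alt_pick (cands : List String) (seen : PySem.Set String) (need : Nat) : List String :=
  match cands, need with
  | _, 0 => []
  | [], _ => []
  | c :: rest, Nat.succ m =>
      if c ∈ seen then extract_subjects_alt_pick rest seen (Nat.succ m)
      else c :: extract_subjects_alt_pick rest (PySem.Set.add seen c) m

def extract_subjects_alt (text : String) (chunks : List (List (String × List (String × String)))) : List String :=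
  extract_subjects_alt_pick (chunks.flatMap extract_subjects_alt_headings) PySem.Set.empty 5

-- ===== PRECONDITION & SPEC =====
def Spec_extract_subjects (text : String) (chunks : List (List (String × List (String × String)))) (out : List String) : Prop := out = extract_subjects_alt text chunks
instance (text : String) (chunks : List (List (String × List (String × String)))) (out : List String) : Decidable (Spec_extract_subjects text chunks out) := by unfold Spec_extract_subjects; infer_instance

-- ===== CLAIM (what is proved, stated in full; the proofs are below) =====
def Claim_equal_extract_subjects : Prop := ∀ (text : String) (chunks : List (List (String × List (String × String)))), Dom_extract_subjects text chunks → Spec_extract_subjects text chunks (extract_subjects text chunks)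

-- ===== LEMMAS AND PROOFS =====

-- the NEW elements contributed by updating a set s with the stream l, in order
def newOf (s : PySem.Set String) : List String → List String
  | [] => []
  | c :: r => if c ∈ s then newOf s r else c :: newOf (PySem.Set.add s c) r

theorem pick_eq_take (l : List String) (s : PySem.Set String) (n : Nat) :
    extract_subjects_alt_pick l s n = (newOf s l).take n := by
  induction l generalizing s n with
  | nil => cases n <;> simp [extract_subjects_alt_pick, newOf]
  | cons c r ih =>
      cases n with
      | zero => simp [extract_subjects_alt_pick]
      | succ m =>
          by_cases h : c ∈ s <;>
            simp [extract_subjects_alt_pick, newOf, h, ih]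

theorem update_eq_append_newOf (l : List String) (s : PySem.Set String) :
    PySem.Set.update s l = s ++ newOf s l := by
  induction l generalizing s with
  | nil => simp [PySem.Set.update, newOf]
  | cons c r ih =>
      rw [PySem.Set.update_cons, ih]
      by_cases h : c ∈ s
      · simp [newOf, h]
      · simp [newOf, h]

-- one A-step over a chunk is a Set.update by that chunk's candidate list
theorem step_eq_update (s : List String) (chunk : List (String × List (String × String))) :
    extract_subjects_step s chunk = PySem.Set.update s (extract_subjects_alt_headings chunk) := by
  unfold extract_subjects_step extract_subjects_alt_headings
  simp only [List.foldl]
  by_cases h1 : PySem.Str.strip (pyAssocGetD (pyAssocGetD chunk "hierarchy" []) "level_1" "") = "" <;>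
  by_cases h2 : PySem.Str.strip (pyAssocGetD (pyAssocGetD chunk "hierarchy" []) "level_2" "") = "" <;>
    simp [h1, h2, PySem.Set.update_nil, PySem.Set.update_cons, PySem.Set.add_eq_ite]

-- A's whole loop is a Set.update by the flattened candidate stream
theorem foldl_eq_update (chunks : List (List (String × List (String × String)))) (s : List String) :
    chunks.foldl extract_subjects_step s = PySem.Set.update s (chunks.flatMap extract_subjects_alt_headings) := by
  induction chunks generalizing s with
  | nil => simp [PySem.Set.update]
  | cons c rest ih =>
      simp only [List.foldl_cons, List.flatMap_cons, step_eq_update, ih,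
        PySem.Set.update_append]

-- ===== VERDICT (by name: the statement is the Claim_ definition above) =====
theorem extract_subjects_spec : Claim_equal_extract_subjects := by
  intro text chunks _
  unfold Spec_extract_subjects extract_subjects extract_subjects_alt
  rw [foldl_eq_update, pick_eq_take, update_eq_append_newOf]
  simp [PySem.Set.empty]
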